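-- pv_equiv track=rewrite | github.com/GurIlVik/git_lesson_3 | main.py | get_the_number_of_the_day_of_the_week
-- ===== SOURCE A (Python) =====
-- def get_the_number_of_the_day_of_the_week(show):
--     result = ''
--     for i in show:
--         if i >= '0' and i <='9':
--             result += i
--         elif i == '-':
--             pass
--         else:
--             break
--     return result
-- ===== SOURCE B (Python) =====
-- def get_the_number_of_the_day_of_the_week(show):
--     # Pass 1: find the first index where the digit-or-dash prefix ends.
--     n = len(show)
--     i = 0
--     while i < n and ('0' <= show[i] <= '9' or show[i] == '-'):
--         i += 1
--     # Pass 2: slice that prefix and delete the dashes with str.replace.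
--     return show[:i].replace('-', '')
-- ===== Notes on version B (the rewrite author's own statement) =====
-- stated objective: alternative
-- what changed: Replaces A's fused accumulate-with-break character loop by an index-based boundary search (a while loop over positions with no accumulation), a slice of that prefix, and a str.replace pass that deletes the dashes.
import Mathlib
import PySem

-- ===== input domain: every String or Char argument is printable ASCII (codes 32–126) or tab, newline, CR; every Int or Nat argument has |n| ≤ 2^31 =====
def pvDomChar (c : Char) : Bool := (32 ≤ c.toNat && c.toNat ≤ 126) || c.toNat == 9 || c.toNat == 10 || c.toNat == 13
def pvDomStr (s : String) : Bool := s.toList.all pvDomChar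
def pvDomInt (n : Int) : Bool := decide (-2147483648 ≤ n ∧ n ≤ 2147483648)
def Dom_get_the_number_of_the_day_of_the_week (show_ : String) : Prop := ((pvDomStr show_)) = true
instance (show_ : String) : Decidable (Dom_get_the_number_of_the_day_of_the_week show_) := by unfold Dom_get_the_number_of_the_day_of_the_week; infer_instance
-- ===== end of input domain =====

-- B replaces A's fused accumulate-with-break loop by an index-based boundary search, a slice of that prefix, and a str.replace pass deleting dashes.


-- ===== PORT A =====
-- A's for-loop with break: structural recursion over the characters, accumulating result
def pvLoopA : List Char → List Char
  | [] => []
  | c :: rest =>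
      if '0' ≤ c && c ≤ '9' then c :: pvLoopA rest
      else if c = '-' then pvLoopA rest
      else []

def get_the_number_of_the_day_of_the_week (show_ : String) : String :=
  String.ofList (pvLoopA show_.toList)

-- ===== PORT B =====
-- B's while loop over indices: scan from the front counting positions while the character is a digit or dash
def pvBoundB : List Char → Nat
  | [] => 0
  | c :: rest =>
      if ('0' ≤ c && c ≤ '9') || c = '-' then pvBoundB rest + 1 else 0

def get_the_number_of_the_day_of_the_week_alt (show_ : String) : String :=
  PySem.Str.replace (String.ofList (PySem.List.slice show_.toList none (some ((pvBoundB show_.toList : Nat) : Int)))) "-" ""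

-- ===== PRECONDITION & SPEC =====
def Spec_get_the_number_of_the_day_of_the_week (show_ : String) (out : String) : Prop := out = get_the_number_of_the_day_of_the_week_alt show_
instance (show_ : String) (out : String) : Decidable (Spec_get_the_number_of_the_day_of_the_week show_ out) := by unfold Spec_get_the_number_of_the_day_of_the_week; infer_instance

-- ===== CLAIM (what is proved, stated in full; the proofs are below) =====
def Claim_equal_get_the_number_of_the_day_of_the_week : Prop := ∀ (show_ : String), Dom_get_the_number_of_the_day_of_the_week show_ → Spec_get_the_number_of_the_day_of_the_week show_ (get_the_number_of_the_day_of_the_week show_)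

-- ===== LEMMAS AND PROOFS =====
lemma pvBoundB_take (l : List Char) :
    l.take (pvBoundB l) = l.takeWhile (fun c => ('0' ≤ c && c ≤ '9') || c = '-') := by
  induction l with
  | nil => rfl
  | cons c rest ih =>
      simp only [pvBoundB, List.takeWhile]
      by_cases h : (('0' ≤ c && c ≤ '9') || c = '-') = true
      · simp [h, ih]
      · simp [h]

lemma replace_dash_go (fuel : Nat) (l acc : List Char) (h : l.length ≤ fuel) :
    PySem.Chars.replace.go ['-'] [] fuel l acc = acc.reverse ++ l.filter (fun c => c ≠ '-') := by
  induction fuel generalizing l acc with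
  | zero =>
      cases l with
      | nil => simp [PySem.Chars.replace.go]
      | cons c t => simp at h
  | succ n ih =>
      cases l with
      | nil => simp [PySem.Chars.replace.go]
      | cons c t =>
          simp only [List.length_cons] at h
          by_cases hc : c = '-'
          · subst hc
            have hpre : List.isPrefixOf ['-'] ('-' :: t) = true := by
              simp [List.isPrefixOf]
            simp [PySem.Chars.replace.go, hpre, ih t acc (by omega), List.filter]
          · have hpre : List.isPrefixOf ['-'] (c :: t) = false := by
              simp [List.isPrefixOf]; exact fun hh => hc hh.symm
            simp [PySem.Chars.replace.go, hpre, ih t (c :: acc) (by omega), List.filter, hc]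

lemma replace_dash (l : List Char) :
    PySem.Chars.replace l ['-'] [] = l.filter (fun c => c ≠ '-') := by
  simp only [PySem.Chars.replace, List.isEmpty]
  exact replace_dash_go l.length l [] le_rfl

lemma pvLoopA_eq (l : List Char) :
    pvLoopA l = (l.takeWhile (fun c => ('0' ≤ c && c ≤ '9') || c = '-')).filter (fun c => c ≠ '-') := by
  induction l with
  | nil => rfl
  | cons c rest ih =>
      simp only [pvLoopA, List.takeWhile]
      by_cases hd : ('0' ≤ c && c ≤ '9') = true
      · have hne : ¬ c = '-' := by intro h; subst h; simp at hd
        simp [hd, hne, List.filter, ih]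
      · by_cases hm : c = '-'
        · simp [hm, ih]
        · simp [hd, hm]

set_option maxHeartbeats 1000000 in
-- ===== VERDICT (by name: the statement is the Claim_ definition above) =====
theorem get_the_number_of_the_day_of_the_week_spec : Claim_equal_get_the_number_of_the_day_of_the_week := by
  intro s _
  unfold Spec_get_the_number_of_the_day_of_the_week get_the_number_of_the_day_of_the_week get_the_number_of_the_day_of_the_week_alt
  rw [PySem.List.slice_to_natCast, pvBoundB_take, pvLoopA_eq]
  have h2 : (PySem.Str.replace (String.ofList (List.takeWhile (fun c => ('0' ≤ c && c ≤ '9') || c = '-') s.toList)) "-" "").toList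
      = PySem.Chars.replace (List.takeWhile (fun c => ('0' ≤ c && c ≤ '9') || c = '-') s.toList) ['-'] [] := by
    rw [PySem.Str.toList_replace]
    simp
  rw [replace_dash] at h2
  rw [← h2, String.ofList_toList]
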